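-- pv_equiv track=rewrite | github.com/RipMyMartin/TarkvaraMetoodikat | calc.py | logi
-- ===== SOURCE A (Python) =====
-- def logi(logs):
--     jag = 0
--     kor = 0
--     liit = 0
--     lah = 0
--     for elem in logs:
--         if elem == 'liitumine':
--             liit += 1
--         elif elem == 'lahutamine':
--             lah += 1
--         elif elem == 'korrutamine':
--             kor += 1
--         elif elem == 'jagamine':
--             jag += 1
--
--     return[liit, lah, kor, jag]
-- ===== SOURCE B (Python) =====
-- def logi(logs):
--     return [logs.count(k) for k in ('liitumine', 'lahutamine', 'korrutamine', 'jagamine')]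
-- ===== Notes on version B (the rewrite author's own statement) =====
-- stated objective: idiomatic
-- what changed: B replaces A's single pass with four scalar accumulators and an if/elif chain by four staged passes: one list.count scan per fixed key, mapped over the key tuple.
import Mathlib
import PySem

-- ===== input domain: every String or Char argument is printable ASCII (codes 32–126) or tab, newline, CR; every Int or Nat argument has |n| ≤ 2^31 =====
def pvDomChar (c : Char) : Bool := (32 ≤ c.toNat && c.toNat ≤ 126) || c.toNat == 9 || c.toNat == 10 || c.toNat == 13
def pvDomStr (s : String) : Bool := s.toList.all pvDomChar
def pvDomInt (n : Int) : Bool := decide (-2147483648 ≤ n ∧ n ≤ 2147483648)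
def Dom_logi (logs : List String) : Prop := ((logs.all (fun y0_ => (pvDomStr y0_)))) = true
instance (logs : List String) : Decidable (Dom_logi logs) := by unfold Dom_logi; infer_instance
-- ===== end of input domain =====

-- B replaces A's single-pass four-accumulator if/elif loop by one list.count pass per fixed key (idiomatic).
-- ===== PORT A =====
def logi (logs : List String) : List Int :=
  let s := logs.foldl (fun (st : Int × Int × Int × Int) elem =>
    let (jag, kor, liit, lah) := st
    if elem == "liitumine" then (jag, kor, liit + 1, lah)
    else if elem == "lahutamine" then (jag, kor, liit, lah + 1)
    else if elem == "korrutamine" then (jag, kor + 1, liit, lah)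
    else if elem == "jagamine" then (jag + 1, kor, liit, lah)
    else (jag, kor, liit, lah)) (0, 0, 0, 0)
  [s.2.2.1, s.2.2.2, s.2.1, s.1]

-- ===== PORT B =====
def logi_alt (logs : List String) : List Int :=
  ["liitumine", "lahutamine", "korrutamine", "jagamine"].map
    (fun k => PySem.List.count logs k)

-- ===== PRECONDITION & SPEC =====
def Spec_logi (logs : List String) (out : List Int) : Prop := out = logi_alt logs
instance (logs : List String) (out : List Int) : Decidable (Spec_logi logs out) := by unfold Spec_logi; infer_instance

-- ===== CLAIM (what is proved, stated in full; the proofs are below) =====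
def Claim_equal_logi : Prop := ∀ (logs : List String), Dom_logi logs → Spec_logi logs (logi logs)

-- ===== LEMMAS AND PROOFS =====

-- A's fold invariant: each accumulator component advances by the count of its event name.
theorem logi_foldl_count (logs : List String) (jag kor liit lah : Int) :
    logs.foldl (fun (st : Int × Int × Int × Int) elem =>
      let (jag, kor, liit, lah) := st
      if elem == "liitumine" then (jag, kor, liit + 1, lah)
      else if elem == "lahutamine" then (jag, kor, liit, lah + 1)
      else if elem == "korrutamine" then (jag, kor + 1, liit, lah)
      else if elem == "jagamine" then (jag + 1, kor, liit, lah)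
      else (jag, kor, liit, lah)) (jag, kor, liit, lah)
    = (jag + logs.count "jagamine", kor + logs.count "korrutamine",
       liit + logs.count "liitumine", lah + logs.count "lahutamine") := by
  induction logs generalizing jag kor liit lah with
  | nil => simp
  | cons x xs ih =>
    rw [List.foldl_cons]
    by_cases h1 : x = "liitumine"
    · subst h1
      show List.foldl _ (jag, kor, liit + 1, lah) xs = _
      rw [ih]
      simp [Prod.ext_iff]
      omega
    · by_cases h2 : x = "lahutamine"
      · subst h2
        show List.foldl _ (jag, kor, liit, lah + 1) xs = _
        rw [ih]
        simp [Prod.ext_iff, h1]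
        omega
      · by_cases h3 : x = "korrutamine"
        · subst h3
          show List.foldl _ (jag, kor + 1, liit, lah) xs = _
          rw [ih]
          simp [Prod.ext_iff, h1, h2]
          omega
        · by_cases h4 : x = "jagamine"
          · subst h4
            show List.foldl _ (jag + 1, kor, liit, lah) xs = _
            rw [ih]
            simp [Prod.ext_iff, h1, h2, h3]
            omega
          · show List.foldl _
              (if x == "liitumine" then (jag, kor, liit + 1, lah)
               else if x == "lahutamine" then (jag, kor, liit, lah + 1)
               else if x == "korrutamine" then (jag, kor + 1, liit, lah)
               else if x == "jagamine" then (jag + 1, kor, liit, lah)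
               else (jag, kor, liit, lah)) xs = _
            rw [if_neg (by simp [h1]), if_neg (by simp [h2]), if_neg (by simp [h3]),
                if_neg (by simp [h4]), ih]
            simp [h1, h2, h3, h4]

-- ===== VERDICT (by name: the statement is the Claim_ definition above) =====
theorem logi_spec : Claim_equal_logi := by
  intro logs _
  unfold Spec_logi logi logi_alt
  simp only [logi_foldl_count, PySem.List.count_eq, List.map]
  simp
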